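-- pv_equiv track=rewrite | github.com/lightproud/brain-in-a-vat | scripts/knowledge_graph.py | graph_distance
-- ===== SOURCE A (Python) =====
-- from collections import defaultdict
--
-- def graph_distance(graph: dict, node_a: str, node_b: str, max_depth: int = 4) -> int:
--     """Find shortest path distance between two nodes. Returns -1 if not connected."""
--     if node_a == node_b:
--         return 0
--
--     visited = {node_a}
--     frontier = [node_a]
--
--     # Build adjacency index for faster traversal
--     adj = defaultdict(set)
--     for edge in graph["edges"]:
--         adj[edge["source"]].add(edge["target"])
--         adj[edge["target"]].add(edge["source"])
--
--     for d in range(1, max_depth + 1):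
--         next_frontier = []
--         for current_id in frontier:
--             for neighbor_id in adj[current_id]:
--                 if neighbor_id == node_b:
--                     return d
--                 if neighbor_id not in visited:
--                     visited.add(neighbor_id)
--                     next_frontier.append(neighbor_id)
--         frontier = next_frontier
--
--     return -1
-- ===== SOURCE B (Python) =====
-- def graph_distance(graph: dict, node_a: str, node_b: str, max_depth: int = 4) -> int:
--     """Find shortest path distance between two nodes. Returns -1 if not connected."""
--     if node_a == node_b:
--         return 0
--     edges = graph["edges"]
--     reach = {node_a}
--     for d in range(1, max_depth + 1):
--         # grow the reachable set by one hop, scanning the edge list directly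
--         new = set(reach)
--         for edge in edges:
--             s, t = edge["source"], edge["target"]
--             if s in reach:
--                 new.add(t)
--             if t in reach:
--                 new.add(s)
--         if node_b in new:
--             return d
--         if len(new) == len(reach):   # fixpoint: nothing new is reachable
--             return -1
--         reach = new
--     return -1
-- ===== Notes on version B (the rewrite author's own statement) =====
-- stated objective: alternative
-- what changed: Replaces the frontier/visited BFS with an adjacency index by an iterated one-hop expansion of the whole reachable set that scans the raw edge list each round (no adjacency dict, no frontier, no early return inside the scan) and stops early at a fixpoint when the reachable set stops growing.
import Mathlib
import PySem

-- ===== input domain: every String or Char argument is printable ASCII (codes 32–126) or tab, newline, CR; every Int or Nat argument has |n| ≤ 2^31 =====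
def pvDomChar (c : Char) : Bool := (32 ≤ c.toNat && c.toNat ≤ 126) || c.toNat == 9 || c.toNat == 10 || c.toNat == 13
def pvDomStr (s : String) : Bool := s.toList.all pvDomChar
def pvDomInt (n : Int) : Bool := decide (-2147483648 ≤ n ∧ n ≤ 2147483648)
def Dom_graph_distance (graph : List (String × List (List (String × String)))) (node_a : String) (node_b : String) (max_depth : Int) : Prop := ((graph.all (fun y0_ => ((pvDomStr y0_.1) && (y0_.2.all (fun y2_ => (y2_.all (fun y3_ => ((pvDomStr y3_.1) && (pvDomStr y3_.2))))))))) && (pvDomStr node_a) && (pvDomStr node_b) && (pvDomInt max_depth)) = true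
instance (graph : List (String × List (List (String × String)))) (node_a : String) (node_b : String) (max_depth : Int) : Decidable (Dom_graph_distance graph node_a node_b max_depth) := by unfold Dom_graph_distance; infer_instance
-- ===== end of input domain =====

-- B replaces A's frontier/visited BFS over an adjacency index by an iterated one-hop expansion of
-- the whole reachable set scanning the raw edge list, with a fixpoint early exit (objective: alternative).

-- ===== PORT A =====
-- adjacency index: for edge in graph["edges"]: adj[edge["source"]].add(edge["target"]); adj[edge["target"]].add(edge["source"])
def pvAdj (edges : List (List (String × String))) : PySem.Dict String (PySem.Set String) :=
  edges.foldl (fun adj e =>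
    let s := (PySem.Dict.mk e).getD "source" ""
    let t := (PySem.Dict.mk e).getD "target" ""
    let adj := adj.modify s PySem.Set.empty (fun S => PySem.Set.add S t)
    adj.modify t PySem.Set.empty (fun S => PySem.Set.add S s)) PySem.Dict.empty

-- inner loop: for neighbor_id in adj[current_id] (result provably independent of set order)
def pvScanNbrs (node_b : String) : List String → PySem.Set String → List String →
    Option (PySem.Set String × List String)
  | [], visited, nf => some (visited, nf)
  | n :: rest, visited, nf =>
    if n = node_b then none
    else if PySem.Set.contains visited n then pvScanNbrs node_b rest visited nf
    else pvScanNbrs node_b rest (PySem.Set.add visited n) (nf ++ [n])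

-- middle loop: for current_id in frontier
def pvScanFrontier (adj : PySem.Dict String (PySem.Set String)) (node_b : String) :
    List String → PySem.Set String → List String → Option (PySem.Set String × List String)
  | [], visited, nf => some (visited, nf)
  | c :: rest, visited, nf =>
    match pvScanNbrs node_b (adj.getD c PySem.Set.empty) visited nf with
    | none => none
    | some (visited', nf') => pvScanFrontier adj node_b rest visited' nf'

-- outer loop: for d in range(1, max_depth + 1)
def pvLevels (adj : PySem.Dict String (PySem.Set String)) (node_b : String) :
    Nat → Int → List String → PySem.Set String → Int
  | 0, _, _, _ => -1
  | fuel + 1, d, frontier, visited =>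
    match pvScanFrontier adj node_b frontier visited [] with
    | none => d
    | some (visited', nf) => pvLevels adj node_b fuel (d + 1) nf visited'

def graph_distance (graph : List (String × List (List (String × String)))) (node_a : String) (node_b : String) (max_depth : Int) : Int :=
  if node_a = node_b then 0
  else
    let edges := (PySem.Dict.mk graph).getD "edges" []
    pvLevels (pvAdj edges) node_b max_depth.toNat 1 [node_a] (PySem.Set.ofList [node_a])

-- ===== PORT B =====
-- one round: new = set(reach); for edge in edges: if source in reach: new.add(target); if target in reach: new.add(source)
def pvStep (edges : List (List (String × String))) (R : PySem.Set String) : PySem.Set String :=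
  edges.foldl (fun new e =>
    let s := (PySem.Dict.mk e).getD "source" ""
    let t := (PySem.Dict.mk e).getD "target" ""
    let new := if PySem.Set.contains R s then PySem.Set.add new t else new
    if PySem.Set.contains R t then PySem.Set.add new s else new) R

-- for d in range(1, max_depth + 1): expand; found?; fixpoint?
def pvGrow (edges : List (List (String × String))) (node_b : String) :
    Nat → Int → PySem.Set String → Int
  | 0, _, _ => -1
  | fuel + 1, d, R =>
    let R' := pvStep edges R
    if PySem.Set.contains R' node_b then d
    else if PySem.Set.len R' = PySem.Set.len R then -1
    else pvGrow edges node_b fuel (d + 1) R'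

def graph_distance_alt (graph : List (String × List (List (String × String)))) (node_a : String) (node_b : String) (max_depth : Int) : Int :=
  if node_a = node_b then 0
  else
    let edges := (PySem.Dict.mk graph).getD "edges" []
    pvGrow edges node_b max_depth.toNat 1 (PySem.Set.ofList [node_a])

-- ===== PRECONDITION & SPEC =====
-- Pre_ excludes exactly the inputs where Python A raises KeyError: node_a ≠ node_b and the graph
-- lacks an "edges" key, or some edge lacks a "source"/"target" key (B raises there too).
def Pre_graph_distance (graph : List (String × List (List (String × String)))) (node_a : String) (node_b : String) (max_depth : Int) : Prop :=
  node_a = node_b ∨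
    ((PySem.Dict.mk graph).contains "edges" = true ∧
      ∀ e ∈ (PySem.Dict.mk graph).getD "edges" [],
        (PySem.Dict.mk e).contains "source" = true ∧ (PySem.Dict.mk e).contains "target" = true)
instance (graph : List (String × List (List (String × String)))) (node_a : String) (node_b : String) (max_depth : Int) : Decidable (Pre_graph_distance graph node_a node_b max_depth) := by unfold Pre_graph_distance; infer_instance

def pvWitness_graph_distance : (List (String × List (List (String × String)))) × String × String × Int :=
  ([("edges", [[("source", "a"), ("target", "b")], [("source", "b"), ("target", "c")]])], "a", "c", 4)

def Spec_graph_distance (graph : List (String × List (List (String × String)))) (node_a : String) (node_b : String) (max_depth : Int) (out : Int) : Prop := out = graph_distance_alt graph node_a node_b max_depth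
instance (graph : List (String × List (List (String × String)))) (node_a : String) (node_b : String) (max_depth : Int) (out : Int) : Decidable (Spec_graph_distance graph node_a node_b max_depth out) := by unfold Spec_graph_distance; infer_instance

-- ===== CLAIM (what is proved, stated in full; the proofs are below) =====
def Claim_equal_graph_distance : Prop := ∀ (graph : List (String × List (List (String × String)))) (node_a : String) (node_b : String) (max_depth : Int), Dom_graph_distance graph node_a node_b max_depth → Pre_graph_distance graph node_a node_b max_depth → Spec_graph_distance graph node_a node_b max_depth (graph_distance graph node_a node_b max_depth)

-- ===== LEMMAS AND PROOFS =====

-- the undirected neighbour relation induced by the edge list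
def pvENbr (edges : List (List (String × String))) (u x : String) : Prop :=
  ∃ e ∈ edges,
    ((PySem.Dict.mk e).getD "source" "" = u ∧ (PySem.Dict.mk e).getD "target" "" = x) ∨
    ((PySem.Dict.mk e).getD "source" "" = x ∧ (PySem.Dict.mk e).getD "target" "" = u)

-- membership after registering one undirected edge in the adjacency index
theorem pv_mod2 (acc : PySem.Dict String (PySem.Set String)) (s t u x : String) :
    x ∈ ((acc.modify s PySem.Set.empty (fun S => PySem.Set.add S t)).modify t PySem.Set.empty
        (fun S => PySem.Set.add S s)).getD u PySem.Set.empty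
    ↔ x ∈ acc.getD u PySem.Set.empty ∨ (s = u ∧ t = x) ∨ (s = x ∧ t = u) := by
  simp only [PySem.Dict.getD_modify]
  split_ifs <;> subst_vars <;> simp [PySem.Set.mem_add] <;> aesop

theorem pv_adj_mem_aux (edges : List (List (String × String))) :
    ∀ (acc : PySem.Dict String (PySem.Set String)) (u x : String),
    x ∈ (edges.foldl (fun adj e =>
      let s := (PySem.Dict.mk e).getD "source" ""
      let t := (PySem.Dict.mk e).getD "target" ""
      let adj := adj.modify s PySem.Set.empty (fun S => PySem.Set.add S t)
      adj.modify t PySem.Set.empty (fun S => PySem.Set.add S s)) acc).getD u PySem.Set.empty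
    ↔ x ∈ acc.getD u PySem.Set.empty ∨ pvENbr edges u x := by
  induction edges with
  | nil => simp [pvENbr]
  | cons e es ih =>
    intro acc u x
    simp only [List.foldl_cons, ih]
    rw [pv_mod2]
    simp only [pvENbr, List.exists_mem_cons_iff]
    rw [or_assoc]

theorem pv_adj_mem (edges : List (List (String × String))) (u x : String) :
    x ∈ (pvAdj edges).getD u PySem.Set.empty ↔ pvENbr edges u x := by
  unfold pvAdj
  rw [pv_adj_mem_aux]
  simp [PySem.Dict.getD_empty, PySem.Set.empty]

theorem pv_step_mem_aux (R : PySem.Set String) (edges : List (List (String × String))) :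
    ∀ (acc : PySem.Set String) (x : String),
    x ∈ (edges.foldl (fun new e =>
      let s := (PySem.Dict.mk e).getD "source" ""
      let t := (PySem.Dict.mk e).getD "target" ""
      let new := if PySem.Set.contains R s then PySem.Set.add new t else new
      if PySem.Set.contains R t then PySem.Set.add new s else new) acc)
    ↔ x ∈ acc ∨ ∃ e ∈ edges,
        (((PySem.Dict.mk e).getD "source" "" ∈ R ∧ x = (PySem.Dict.mk e).getD "target" "") ∨
         ((PySem.Dict.mk e).getD "target" "" ∈ R ∧ x = (PySem.Dict.mk e).getD "source" "")) := by
  induction edges with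
  | nil => simp
  | cons e es ih =>
    intro acc x
    simp only [List.foldl_cons, ih, List.exists_mem_cons_iff]
    have hstep : ∀ (new : PySem.Set String) (s t : String),
        x ∈ (if PySem.Set.contains R t
              then PySem.Set.add (if PySem.Set.contains R s then PySem.Set.add new t else new) s
              else (if PySem.Set.contains R s then PySem.Set.add new t else new))
        ↔ x ∈ new ∨ (s ∈ R ∧ x = t) ∨ (t ∈ R ∧ x = s) := by
      intro new s t
      split_ifs with h1 h2 h2 <;>
        simp only [PySem.Set.contains_iff] at * <;>
        simp [PySem.Set.mem_add] <;> aesop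
    rw [hstep]
    rw [or_assoc]

theorem pv_step_mem (edges : List (List (String × String))) (R : PySem.Set String) (x : String) :
    x ∈ pvStep edges R ↔ x ∈ R ∨ ∃ u ∈ R, pvENbr edges u x := by
  unfold pvStep
  rw [pv_step_mem_aux]
  refine or_congr Iff.rfl ?_
  constructor
  · rintro ⟨e, he, ⟨hs, rfl⟩ | ⟨ht, rfl⟩⟩
    · exact ⟨_, hs, e, he, Or.inl ⟨rfl, rfl⟩⟩
    · exact ⟨_, ht, e, he, Or.inr ⟨rfl, rfl⟩⟩
  · rintro ⟨u, huR, e, he, ⟨h1, h2⟩ | ⟨h1, h2⟩⟩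
    · subst h1; subst h2; exact ⟨e, he, Or.inl ⟨huR, rfl⟩⟩
    · subst h1; subst h2; exact ⟨e, he, Or.inr ⟨huR, rfl⟩⟩

theorem pv_step_prefix (edges : List (List (String × String))) (R : PySem.Set String) :
    R <+: pvStep edges R := by
  unfold pvStep
  suffices h : ∀ (es : List (List (String × String))) (acc : PySem.Set String),
      acc <+: es.foldl (fun new e =>
        let s := (PySem.Dict.mk e).getD "source" ""
        let t := (PySem.Dict.mk e).getD "target" ""
        let new := if PySem.Set.contains R s then PySem.Set.add new t else new
        if PySem.Set.contains R t then PySem.Set.add new s else new) acc from h edges R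
  intro es
  induction es with
  | nil => intro acc; simp
  | cons e es ih =>
    intro acc
    refine List.IsPrefix.trans ?_ (ih _)
    have hadd : ∀ (S : PySem.Set String) (y : String), S <+: PySem.Set.add S y := by
      intro S y
      rw [PySem.Set.add_eq_ite]
      split_ifs
      · exact List.prefix_refl S
      · exact List.prefix_append S [y]
    dsimp only
    split_ifs <;> first
      | exact List.IsPrefix.trans (hadd _ _) (hadd _ _)
      | exact hadd _ _
      | exact List.prefix_refl _

theorem pv_levels_nil (adj : PySem.Dict String (PySem.Set String)) (node_b : String)
    (fuel : Nat) : ∀ (d : Int) (visited : PySem.Set String),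
    pvLevels adj node_b fuel d [] visited = -1 := by
  induction fuel with
  | zero => intro d visited; rfl
  | succ fuel ih =>
    intro d visited
    simp only [pvLevels, pvScanFrontier]
    exact ih (d + 1) visited

theorem pv_scanNbrs_found (node_b : String) (ns : List String) :
    ∀ (visited : PySem.Set String) (nf : List String), node_b ∈ ns →
    pvScanNbrs node_b ns visited nf = none := by
  induction ns with
  | nil => intro _ _ h; cases h
  | cons n rest ih =>
    intro visited nf h
    simp only [pvScanNbrs]
    by_cases hn : n = node_b
    · rw [if_pos hn]
    · rw [if_neg hn]
      have hrest : node_b ∈ rest := by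
        rcases List.mem_cons.mp h with rfl | h'
        · exact absurd rfl hn
        · exact h'
      split_ifs <;> exact ih _ _ hrest

theorem pv_scanNbrs_not_found (node_b : String) (ns : List String) :
    ∀ (visited : PySem.Set String) (nf : List String), node_b ∉ ns →
    ∃ v' nf', pvScanNbrs node_b ns visited nf = some (v', nf') ∧
      (∀ x, x ∈ v' ↔ x ∈ visited ∨ x ∈ ns) ∧
      (∀ x, x ∈ nf' ↔ x ∈ nf ∨ (x ∉ visited ∧ x ∈ ns)) := by
  induction ns with
  | nil => intro visited nf _; exact ⟨visited, nf, rfl, by simp, by simp⟩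
  | cons n rest ih =>
    intro visited nf h
    have hbn : ¬ n = node_b := fun e => h (e ▸ List.mem_cons_self)
    have hbr : node_b ∉ rest := fun hr => h (List.mem_cons_of_mem _ hr)
    simp only [pvScanNbrs, if_neg hbn]
    by_cases hn : PySem.Set.contains visited n
    · rw [if_pos hn]
      have hnmem : n ∈ visited := (PySem.Set.contains_iff _ _).mp hn
      obtain ⟨v', nf', heq, hv, hnf⟩ := ih visited nf hbr
      refine ⟨v', nf', heq, fun x => ?_, fun x => ?_⟩
      · rw [hv x]; simp only [List.mem_cons]
        constructor
        · tauto
        · rintro (h1 | rfl | h1)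
          · tauto
          · exact Or.inl hnmem
          · tauto
      · rw [hnf x]; simp only [List.mem_cons]
        constructor
        · tauto
        · rintro (h1 | ⟨h2, (rfl | h3)⟩)
          · tauto
          · exact absurd hnmem h2
          · tauto
    · rw [if_neg hn]
      have hnmem : n ∉ visited := fun hm => hn ((PySem.Set.contains_iff _ _).mpr hm)
      obtain ⟨v', nf', heq, hv, hnf⟩ := ih (PySem.Set.add visited n) (nf ++ [n]) hbr
      refine ⟨v', nf', heq, fun x => ?_, fun x => ?_⟩
      · rw [hv x]; simp only [PySem.Set.mem_add, List.mem_cons]; tauto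
      · rw [hnf x]
        simp only [PySem.Set.mem_add, List.mem_append, List.mem_cons, List.not_mem_nil, or_false]
        constructor
        · rintro ((h1 | rfl) | ⟨h2, h3⟩)
          · tauto
          · exact Or.inr ⟨hnmem, Or.inl rfl⟩
          · exact Or.inr ⟨fun hx => h2 (Or.inl hx), Or.inr h3⟩
        · rintro (h1 | ⟨h2, (rfl | h3)⟩)
          · tauto
          · exact Or.inl (Or.inr rfl)
          · by_cases hxn : x = n
            · exact Or.inl (Or.inr hxn)
            · exact Or.inr ⟨fun hx => hx.elim h2 hxn, h3⟩

theorem pv_scanFrontier_found (adj : PySem.Dict String (PySem.Set String)) (node_b : String)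
    (frontier : List String) :
    ∀ (visited : PySem.Set String) (nf : List String),
    (∃ c ∈ frontier, node_b ∈ adj.getD c PySem.Set.empty) →
    pvScanFrontier adj node_b frontier visited nf = none := by
  induction frontier with
  | nil => rintro _ _ ⟨c, hc, _⟩; cases hc
  | cons c rest ih =>
    rintro visited nf ⟨c', hc', hb⟩
    simp only [pvScanFrontier]
    by_cases hcb : node_b ∈ adj.getD c PySem.Set.empty
    · rw [pv_scanNbrs_found node_b _ _ _ hcb]
    · have hc'' : c' ∈ rest := by
        rcases List.mem_cons.mp hc' with rfl | h'
        · exact absurd hb hcb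
        · exact h'
      obtain ⟨v', nf', heq, _, _⟩ := pv_scanNbrs_not_found node_b _ visited nf hcb
      rw [heq]
      exact ih v' nf' ⟨c', hc'', hb⟩

theorem pv_scanFrontier_not_found (adj : PySem.Dict String (PySem.Set String)) (node_b : String)
    (frontier : List String) :
    ∀ (visited : PySem.Set String) (nf : List String),
    (∀ c ∈ frontier, node_b ∉ adj.getD c PySem.Set.empty) →
    ∃ v' nf', pvScanFrontier adj node_b frontier visited nf = some (v', nf') ∧
      (∀ x, x ∈ v' ↔ x ∈ visited ∨ ∃ c ∈ frontier, x ∈ adj.getD c PySem.Set.empty) ∧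
      (∀ x, x ∈ nf' ↔ x ∈ nf ∨ (x ∉ visited ∧ ∃ c ∈ frontier, x ∈ adj.getD c PySem.Set.empty)) := by
  induction frontier with
  | nil => intro visited nf _; exact ⟨visited, nf, rfl, by simp, by simp⟩
  | cons c rest ih =>
    intro visited nf h
    have hcb : node_b ∉ adj.getD c PySem.Set.empty := h c List.mem_cons_self
    have hrest : ∀ c' ∈ rest, node_b ∉ adj.getD c' PySem.Set.empty :=
      fun c' hc' => h c' (List.mem_cons_of_mem _ hc')
    obtain ⟨v1, nf1, heq1, hv1, hnf1⟩ := pv_scanNbrs_not_found node_b _ visited nf hcb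
    obtain ⟨v', nf', heq, hv, hnf⟩ := ih v1 nf1 hrest
    simp only [pvScanFrontier, heq1, heq]
    refine ⟨v', nf', rfl, fun x => ?_, fun x => ?_⟩
    · rw [hv x]
      simp only [List.exists_mem_cons_iff]
      have A := hv1 x
      tauto
    · rw [hnf x]
      simp only [List.exists_mem_cons_iff]
      have A := hv1 x
      have B := hnf1 x
      by_cases hxc : x ∈ adj.getD c PySem.Set.empty <;> tauto

-- the main loop invariant: visited and R hold the same nodes, node_b is not among them,
-- frontier nodes lie in R, and every non-frontier node of R has all its neighbours in R
theorem pv_main (edges : List (List (String × String))) (node_b : String) :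
    ∀ (fuel : Nat) (d : Int) (frontier : List String) (visited R : PySem.Set String),
      (∀ x, x ∈ visited ↔ x ∈ R) →
      node_b ∉ R →
      (∀ c ∈ frontier, c ∈ R) →
      (∀ x ∈ R, x ∉ frontier → ∀ y, pvENbr edges x y → y ∈ R) →
      pvLevels (pvAdj edges) node_b fuel d frontier visited = pvGrow edges node_b fuel d R := by
  intro fuel
  induction fuel with
  | zero => intro d frontier visited R _ _ _ _; rfl
  | succ fuel ih =>
    intro d frontier visited R hVR hbR hFR hCl
    by_cases hfound : ∃ c ∈ frontier, node_b ∈ (pvAdj edges).getD c PySem.Set.empty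
    · obtain ⟨c, hcF, hcb⟩ := hfound
      have hA : pvScanFrontier (pvAdj edges) node_b frontier visited [] = none :=
        pv_scanFrontier_found _ _ _ _ _ ⟨c, hcF, hcb⟩
      have hB : node_b ∈ pvStep edges R :=
        (pv_step_mem _ _ _).mpr (Or.inr ⟨c, hFR c hcF, (pv_adj_mem edges c node_b).mp hcb⟩)
      simp only [pvLevels, hA, pvGrow]
      rw [if_pos ((PySem.Set.contains_iff _ _).mpr hB)]
    · push_neg at hfound
      obtain ⟨v', nf', heq, hv, hnf⟩ := pv_scanFrontier_not_found _ _ _ visited [] hfound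
      have hbR' : node_b ∉ pvStep edges R := by
        intro hb'
        rcases (pv_step_mem _ _ _).mp hb' with h | ⟨u, huR, hun⟩
        · exact hbR h
        · by_cases huF : u ∈ frontier
          · exact hfound u huF ((pv_adj_mem edges u node_b).mpr hun)
          · exact hbR (hCl u huR huF node_b hun)
      have hR' : ∀ x, x ∈ pvStep edges R ↔ x ∈ R ∨ ∃ c ∈ frontier, pvENbr edges c x := by
        intro x
        rw [pv_step_mem]
        constructor
        · rintro (h | ⟨u, huR, hun⟩)
          · exact Or.inl h
          · by_cases huF : u ∈ frontier
            · exact Or.inr ⟨u, huF, hun⟩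
            · exact Or.inl (hCl u huR huF x hun)
        · rintro (h | ⟨c, hcF, hc⟩)
          · exact Or.inl h
          · exact Or.inr ⟨c, hFR c hcF, hc⟩
      simp only [pvLevels, heq, pvGrow]
      rw [if_neg (fun hc => hbR' ((PySem.Set.contains_iff _ _).mp hc))]
      by_cases hlen : PySem.Set.len (pvStep edges R) = PySem.Set.len R
      · rw [if_pos hlen]
        have hlen' : List.length R = List.length (pvStep edges R) := by
          have h2 := hlen.symm
          simp only [PySem.Set.len] at h2
          exact_mod_cast h2
        have hRR : pvStep edges R = R :=
          ((pv_step_prefix edges R).eq_of_length hlen').symm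
        have hnf_nil : nf' = [] := by
          rw [List.eq_nil_iff_forall_not_mem]
          intro x hx
          rcases (hnf x).mp hx with h | ⟨hxv, c, hcF, hc⟩
          · cases h
          · have hxR' : x ∈ pvStep edges R :=
              (hR' x).mpr (Or.inr ⟨c, hcF, (pv_adj_mem edges c x).mp hc⟩)
            rw [hRR] at hxR'
            exact hxv ((hVR x).mpr hxR')
        rw [hnf_nil]
        exact pv_levels_nil _ _ _ _ _
      · rw [if_neg hlen]
        refine ih (d + 1) nf' v' (pvStep edges R) ?_ hbR' ?_ ?_
        · intro x
          rw [hv x, hR' x]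
          refine or_congr (hVR x) (exists_congr fun c => and_congr_right fun _ => ?_)
          exact pv_adj_mem edges c x
        · intro c hc
          rcases (hnf c).mp hc with h | ⟨_, c', hcF, hcadj⟩
          · cases h
          · exact (hR' c).mpr (Or.inr ⟨c', hcF, (pv_adj_mem edges c' c).mp hcadj⟩)
        · intro x hxR' hxnf y hxy
          rcases (hR' x).mp hxR' with hxR | ⟨c, hcF, hcx⟩
          · by_cases hxF : x ∈ frontier
            · exact (hR' y).mpr (Or.inr ⟨x, hxF, hxy⟩)
            · exact (hR' y).mpr (Or.inl (hCl x hxR hxF y hxy))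
          · by_cases hxV : x ∈ visited
            · have hxR : x ∈ R := (hVR x).mp hxV
              by_cases hxF : x ∈ frontier
              · exact (hR' y).mpr (Or.inr ⟨x, hxF, hxy⟩)
              · exact (hR' y).mpr (Or.inl (hCl x hxR hxF y hxy))
            · exact absurd ((hnf x).mpr (Or.inr ⟨hxV, c, hcF, (pv_adj_mem edges c x).mpr hcx⟩)) hxnf

-- ===== VERDICT (by name: the statement is the Claim_ definition above) =====
theorem graph_distance_spec : Claim_equal_graph_distance := by
  intro graph node_a node_b max_depth _ _
  unfold Spec_graph_distance graph_distance graph_distance_alt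
  by_cases hab : node_a = node_b
  · simp [hab]
  · simp only [if_neg hab]
    exact pv_main _ node_b _ 1 [node_a] _ _ (by simp)
      (by simp [PySem.Set.ofList]; exact fun h => hab h.symm)
      (by simp) (by intro x hx hnx; exact absurd hx hnx)
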